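-- pv_equiv track=rewrite | github.com/AdrS/cryptopals | p51.py | argmin_strict
-- ===== SOURCE A (Python) =====
-- def argmin_strict(lens):
-- 	'Returns index of smallest length or None if there is a tie'
-- 	mi = 0
-- 	tie = False
-- 	for i in range(1, len(lens)):
-- 		if lens[i] < lens[mi]:
-- 			mi = i
-- 			tie = False
-- 		elif lens[i] == lens[mi]:
-- 			tie = True
-- 	if not tie:
-- 		return mi
-- ===== SOURCE B (Python) =====
-- def argmin_strict(lens):
-- 	'Returns index of smallest length or None if there is a tie'
-- 	if not lens:
-- 		return None
-- 	m = min(lens)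
-- 	if lens.count(m) == 1:
-- 		return lens.index(m)
-- 	return None
-- ===== Notes on version B (the rewrite author's own statement) =====
-- stated objective: simpler
-- what changed: B computes the minimum value first (min), then decides by counting its occurrences and locating it with count/index, instead of A's single index loop tracking a running minimum index and a tie flag.
-- intended difference: On the empty list A returns 0 (an out-of-range index left over from initialising mi=0), while B returns None, the intended 'no element' answer. — e.g. on argmin_strict([]): A returns some 0, B returns none
import Mathlib
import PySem

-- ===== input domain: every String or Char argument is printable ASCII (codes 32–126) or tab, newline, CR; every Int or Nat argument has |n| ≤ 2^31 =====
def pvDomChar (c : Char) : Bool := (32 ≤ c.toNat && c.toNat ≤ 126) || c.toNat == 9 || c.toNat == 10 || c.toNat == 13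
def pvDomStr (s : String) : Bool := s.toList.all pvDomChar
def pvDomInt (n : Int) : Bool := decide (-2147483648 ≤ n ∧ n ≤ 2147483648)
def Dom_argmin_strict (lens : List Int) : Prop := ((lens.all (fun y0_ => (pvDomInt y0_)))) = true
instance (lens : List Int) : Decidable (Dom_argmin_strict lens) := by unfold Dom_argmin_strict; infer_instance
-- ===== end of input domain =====

-- B replaces A's single running-minimum-index + tie-flag loop by min/count/index passes;
-- on the empty list A returns 0 while B returns None (stated as D_ below).

-- ===== PORT A =====
def argmin_strict (lens : List Int) : Option Int :=
  let s := (PySem.List.pyRange 1 (lens.length : Int) 1).foldl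
    (fun (st : Int × Bool) i =>
      if PySem.List.pyGetD lens i 0 < PySem.List.pyGetD lens st.1 0 then (i, false)
      else if PySem.List.pyGetD lens i 0 = PySem.List.pyGetD lens st.1 0 then (st.1, true)
      else st) (0, false)
  if s.2 = false then some s.1 else none

-- ===== PORT B =====
def argmin_strict_alt (lens : List Int) : Option Int :=
  if lens = [] then none
  else
    match PySem.List.min? lens (fun x => x) with
    | none => none   -- unreachable: lens ≠ []
    | some m =>
      if PySem.List.count lens m = 1 then (PySem.List.index? lens m).map (fun n => (n : Int))
      else none

-- ===== PRECONDITION & SPEC =====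
-- On the empty list A returns 0 (an out-of-range index left over from initialising mi = 0);
-- B returns None, the intended 'no element' answer.
def D_argmin_strict (lens : List Int) : Prop := lens = []
instance (lens : List Int) : Decidable (D_argmin_strict lens) := by unfold D_argmin_strict; infer_instance
def Spec_argmin_strict (lens : List Int) (out : Option Int) : Prop := ¬ D_argmin_strict lens → out = argmin_strict_alt lens
instance (lens : List Int) (out : Option Int) : Decidable (Spec_argmin_strict lens out) := by unfold Spec_argmin_strict; infer_instance
def pvDiffWitness_argmin_strict : List Int := []
def pvDiffWitnessOut_argmin_strict : (Option Int) × (Option Int) := (some 0, none)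

-- ===== CLAIM (what is proved, stated in full; the proofs are below) =====
def Claim_unchanged_argmin_strict : Prop := ∀ (lens : List Int), Dom_argmin_strict lens → Spec_argmin_strict lens (argmin_strict lens)
def Claim_changed_argmin_strict : Prop := Dom_argmin_strict (pvDiffWitness_argmin_strict) ∧ D_argmin_strict (pvDiffWitness_argmin_strict) ∧ argmin_strict (pvDiffWitness_argmin_strict) = pvDiffWitnessOut_argmin_strict.1 ∧ argmin_strict_alt (pvDiffWitness_argmin_strict) = pvDiffWitnessOut_argmin_strict.2 ∧ pvDiffWitnessOut_argmin_strict.1 ≠ pvDiffWitnessOut_argmin_strict.2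
def Claim_exact_argmin_strict : Prop := ∀ (lens : List Int), Dom_argmin_strict lens → D_argmin_strict lens → argmin_strict lens ≠ argmin_strict_alt lens

-- ===== LEMMAS AND PROOFS =====

-- A's loop body, as a named function of the full list (definitionally the lambda in the port)
def pvStep (lens : List Int) (st : Int × Bool) (i : Int) : Int × Bool :=
  if PySem.List.pyGetD lens i 0 < PySem.List.pyGetD lens st.1 0 then (i, false)
  else if PySem.List.pyGetD lens i 0 = PySem.List.pyGetD lens st.1 0 then (st.1, true)
  else st

-- idxOf? is some idxOf on a member
theorem pvIdxOfEq (p : List Int) (m : Int) (h : m ∈ p) : p.idxOf? m = some (p.idxOf m) := by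
  induction p with
  | nil => simp at h
  | cons a t ih =>
    by_cases hx : a = m
    · subst hx; simp [List.idxOf?_cons, List.idxOf_cons_self]
    · have hm : m ∈ t := by
        cases h with
        | head => exact absurd rfl hx
        | tail _ h' => exact h'
      simp [List.idxOf?_cons, hx, ih hm, List.idxOf_cons_ne _ hx, beq_iff_eq]

-- the (first-position) minimum of p ++ [x] is min m x
theorem pvMin?_snoc (p : List Int) (x m : Int)
    (h : PySem.List.min? p (fun y => y) = some m) :
    PySem.List.min? (p ++ [x]) (fun y => y) = some (min m x) := by
  cases p with
  | nil => simp [PySem.List.min?] at h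
  | cons hd t =>
    rw [List.cons_append, PySem.List.min?_id_cons, List.foldl_append]
    rw [PySem.List.min?_id_cons] at h
    simp at h
    simp [h]

-- loop invariant: after scanning indices 1..k the state is (first index of the minimum of the
-- k-prefix, whether that minimum occurs at least twice in the prefix)
theorem pvInv (lens : List Int) (k : Nat) (hk1 : 1 ≤ k) :
    k ≤ lens.length → ∀ m, PySem.List.min? (lens.take k) (fun y => y) = some m →
    (PySem.List.pyRange 1 (k : Int) 1).foldl (pvStep lens) (0, false)
      = (((lens.take k).idxOf m : Int), decide (2 ≤ (lens.take k).count m)) := by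
  induction k, hk1 using Nat.le_induction with
  | base =>
    intro hk m hm
    cases lens with
    | nil => simp at hk
    | cons h t =>
      simp [PySem.List.min?_id_cons] at hm
      subst hm
      rw [show ((1:Nat):Int) = 1 by norm_num, PySem.List.pyRange_one_eq_nil (by norm_num)]
      simp [List.idxOf_cons_self]
  | succ k hk1 ih =>
    intro hk m hm
    have hklt : k < lens.length := by omega
    set p := lens.take k with hp
    have hplen : p.length = k := by simp [hp]; omega
    have hpne : p ≠ [] := by intro h0; rw [h0] at hplen; simp at hplen; omega
    obtain ⟨mp, hmp⟩ : ∃ mp, PySem.List.min? p (fun y => y) = some mp := by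
      cases hq : PySem.List.min? p (fun y => y) with
      | none =>
        rw [PySem.List.min?_eq_none_iff] at hq
        exact absurd hq hpne
      | some mp => exact ⟨mp, rfl⟩
    have hmem : mp ∈ p := PySem.List.min?_mem hmp
    have hmin : ∀ y ∈ p, mp ≤ y := fun y hy => PySem.List.min?_isMin hmp y hy
    have htake : lens.take (k+1) = p ++ [lens[k]] := List.take_succ_eq_append_getElem hklt
    have hmx : m = min mp (lens[k]'hklt) := by
      have h2 := pvMin?_snoc p (lens[k]'hklt) mp hmp
      rw [htake, h2] at hm
      exact (Option.some_inj.mp hm).symm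
    have hr : PySem.List.pyRange 1 ((k+1 : Nat) : Int) 1
        = PySem.List.pyRange 1 (k:Int) 1 ++ [(k:Int)] := by
      push_cast
      exact PySem.List.pyRange_one_succ_right (by exact_mod_cast hk1)
    rw [hr, List.foldl_append, ih (by omega) mp hmp]
    simp only [List.foldl_cons, List.foldl_nil]
    have hidx : p.idxOf mp < k := by
      have := List.idxOf_lt_length_of_mem hmem
      omega
    have hget_k : PySem.List.pyGetD lens ((k:Nat):Int) 0 = lens[k]'hklt := by
      rw [PySem.List.pyGetD_natCast]
      exact List.getD_eq_getElem lens 0 hklt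
    have hget_idx : PySem.List.pyGetD lens ((p.idxOf mp : Nat):Int) 0 = mp := by
      have h1 : p.getD (p.idxOf mp) 0 = mp := by
        rw [List.getD_eq_getElem p 0 (by omega)]
        exact List.getElem_idxOf (by omega)
      have h2 : lens.getD (p.idxOf mp) 0 = p.getD (p.idxOf mp) 0 := by
        have hc : List.idxOf mp (List.take k lens) < k := by simpa [hp] using hidx
        simp [hp, List.getD_eq_getElem?_getD, hc]
      rw [PySem.List.pyGetD_natCast, h2, h1]
    set x := lens[k]'hklt with hx
    unfold pvStep
    simp only [hget_k, hget_idx]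
    rcases lt_trichotomy x mp with hcase | hcase | hcase
    · rw [if_pos hcase]
      have hxnotin : x ∉ p := fun hin => absurd (hmin x hin) (not_le.mpr hcase)
      have hmeq : m = x := by rw [hmx]; exact min_eq_right hcase.le
      rw [hmeq, htake]
      simp [List.idxOf_append_of_notMem hxnotin, hplen, List.count_append,
        List.count_eq_zero.mpr hxnotin, List.idxOf_cons_self]
    · rw [if_neg (by omega), if_pos hcase]
      have hmeq : m = mp := by rw [hmx, hcase]; simp
      have hc1 : 1 ≤ p.count mp := List.one_le_count_iff.mpr hmem
      rw [hmeq, htake]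
      refine Prod.ext ?_ ?_
      · simp [List.idxOf_append_of_mem hmem]
      · simp [List.count_append, hcase]
        omega
    · rw [if_neg (by omega), if_neg (by omega)]
      have hmeq : m = mp := by rw [hmx]; exact min_eq_left hcase.le
      have hne : x ≠ mp := ne_of_gt hcase
      rw [hmeq, htake]
      refine Prod.ext ?_ ?_
      · simp [List.idxOf_append_of_mem hmem]
      · simp [List.count_append, hne]

theorem pvMain (lens : List Int) (hne : lens ≠ []) :
    argmin_strict lens = argmin_strict_alt lens := by
  have hlen : 1 ≤ lens.length := List.length_pos_of_ne_nil hne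
  obtain ⟨m, hm⟩ : ∃ m, PySem.List.min? lens (fun y => y) = some m := by
    cases hq : PySem.List.min? lens (fun y => y) with
    | none =>
      rw [PySem.List.min?_eq_none_iff] at hq
      exact absurd hq hne
    | some m => exact ⟨m, rfl⟩
  have hm' : PySem.List.min? (lens.take lens.length) (fun y => y) = some m := by
    rw [List.take_length]; exact hm
  have hinv := pvInv lens lens.length hlen (le_refl _) m hm'
  rw [List.take_length] at hinv
  have hA : argmin_strict lens
      = (if ((PySem.List.pyRange 1 (lens.length : Int) 1).foldl (pvStep lens) (0, false)).2 = false
         then some ((PySem.List.pyRange 1 (lens.length : Int) 1).foldl (pvStep lens) (0, false)).1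
         else none) := rfl
  have hmem : m ∈ lens := PySem.List.min?_mem hm
  have hc1 : 1 ≤ lens.count m := List.one_le_count_iff.mpr hmem
  unfold argmin_strict_alt
  rw [if_neg hne, hm]
  by_cases hc : lens.count m = 1
  · have hdec : decide (2 ≤ lens.count m) = false := by simp; omega
    rw [hA, hinv, hdec]
    simp [PySem.List.count_eq, hc, PySem.List.index?_eq_idxOf?, pvIdxOfEq lens m hmem]
  · have hdec : decide (2 ≤ lens.count m) = true := by simp; omega
    rw [hA, hinv, hdec]
    simp [PySem.List.count_eq, hc]

-- ===== VERDICT (by name: the statements are the Claim_ definitions above) =====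
theorem argmin_strict_spec : Claim_unchanged_argmin_strict := by
  intro lens _ hD
  exact pvMain lens hD

theorem argmin_strict_changed : Claim_changed_argmin_strict := by
  unfold Claim_changed_argmin_strict; decide

theorem argmin_strict_tight : Claim_exact_argmin_strict := by
  intro lens _ hD
  subst hD
  decide
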